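-- pv_equiv track=rewrite | github.com/PlinioRPereira/uartDecoder | UartDecoder.py | findTransmitionWindow
-- ===== SOURCE A (Python) =====
-- def findTransmitionWindow(binaryArray, raiseAndFallEdgesQtd):
--     window_start = None
--     window_end = None
--     transitions = 0
--     startPrefixSamplesQtd = 50      # Set start to 50 samples before window_start to facilitate decoding
--
--     for i in range(len(binaryArray) - 1):
--         if binaryArray[i] != binaryArray[i + 1]:
--             transitions += 1
--
--             if transitions == 1:
--                 window_start = i
--
--             if transitions == raiseAndFallEdgesQtd:
--                 window_end = i
--                 break
--
--     if window_start > startPrefixSamplesQtd: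
--         window_start = window_start - startPrefixSamplesQtd
--
--     return window_start, window_end
-- ===== SOURCE B (Python) =====
-- def findTransmitionWindow(binaryArray, raiseAndFallEdgesQtd):
--     edges = [i for i in range(len(binaryArray) - 1)
--              if binaryArray[i] != binaryArray[i + 1]]
--     window_start = edges[0] if edges else None
--     window_end = (edges[raiseAndFallEdgesQtd - 1]
--                   if 1 <= raiseAndFallEdgesQtd <= len(edges) else None)
--     if window_start is not None and window_start > 50:
--         window_start -= 50
--     return window_start, window_end
-- ===== Notes on version B (the rewrite author's own statement) =====
-- stated objective: simpler
-- what changed: Replaces the single stateful scan (transition counter, conditional assignments, break) by building the list of all edge positions once and reading the first and k-th edge by indexing.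
import Mathlib
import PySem

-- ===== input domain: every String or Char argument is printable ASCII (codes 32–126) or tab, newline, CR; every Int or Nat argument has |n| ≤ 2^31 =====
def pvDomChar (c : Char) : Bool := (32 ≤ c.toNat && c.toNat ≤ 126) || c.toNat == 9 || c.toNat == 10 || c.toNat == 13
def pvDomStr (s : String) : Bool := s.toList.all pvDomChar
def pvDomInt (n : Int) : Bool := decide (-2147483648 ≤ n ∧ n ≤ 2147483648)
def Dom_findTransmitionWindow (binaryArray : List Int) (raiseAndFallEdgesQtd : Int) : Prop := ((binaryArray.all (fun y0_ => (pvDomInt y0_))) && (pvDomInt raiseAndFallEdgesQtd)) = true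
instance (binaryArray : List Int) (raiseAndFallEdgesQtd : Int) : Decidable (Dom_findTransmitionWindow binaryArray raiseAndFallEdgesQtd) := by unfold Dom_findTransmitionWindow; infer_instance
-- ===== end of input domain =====

-- B replaces A's stateful counting loop with break by building the list of all edge
-- positions once and indexing it (objective: simpler). Equivalence on Pre_ (≥ 1 edge);
-- outside Pre_ A raises TypeError ('None > 50') while B returns (none, none).

-- ===== PORT A =====
-- the for-loop over range(len-1) with state (window_start, window_end, transitions) and break;
-- indices from List.range are exactly Python's in-range nonnegative indices, so getD is exact
def findTWLoopA (a : List Int) (k : Int) : List Nat → Option Int → Option Int → Int → Option Int × Option Int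
  | [], ws, we, _ => (ws, we)
  | i :: rest, ws, we, t =>
    if a.getD i 0 ≠ a.getD (i+1) 0 then
      let t' := t + 1
      let ws' := if t' = 1 then some (i : Int) else ws
      if t' = k then (ws', some (i : Int))      -- break
      else findTWLoopA a k rest ws' we t'
    else findTWLoopA a k rest ws we t

def findTransmitionWindow (binaryArray : List Int) (raiseAndFallEdgesQtd : Int) : Option Int × Option Int :=
  let r := findTWLoopA binaryArray raiseAndFallEdgesQtd (List.range (binaryArray.length - 1)) none none 0
  match r.1 with
  | none => (none, r.2)   -- Python raises TypeError here ('None > 50'); excluded by Pre_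
  | some s => (if s > 50 then some (s - 50) else some s, r.2)

-- ===== PORT B =====
def findTransmitionWindow_alt (binaryArray : List Int) (raiseAndFallEdgesQtd : Int) : Option Int × Option Int :=
  let edges : List Int :=
    ((List.range (binaryArray.length - 1)).filter
      (fun i => decide (binaryArray.getD i 0 ≠ binaryArray.getD (i+1) 0))).map Int.ofNat
  let we : Option Int :=
    if 1 ≤ raiseAndFallEdgesQtd ∧ raiseAndFallEdgesQtd ≤ (edges.length : Int)
    then some (edges.getD (raiseAndFallEdgesQtd - 1).toNat 0)   -- edges[k-1], index in range: exact
    else none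
  match edges.head? with
  | none => (none, we)
  | some s => (if s > 50 then some (s - 50) else some s, we)

-- ===== PRECONDITION & SPEC =====
-- Pre_ excludes exactly the inputs where A raises TypeError: arrays with no adjacent
-- differing pair (empty, singleton or constant arrays), where window_start stays None.
def Pre_findTransmitionWindow (binaryArray : List Int) (raiseAndFallEdgesQtd : Int) : Prop :=
  ¬ List.IsChain (· = ·) binaryArray
instance (binaryArray : List Int) (raiseAndFallEdgesQtd : Int) : Decidable (Pre_findTransmitionWindow binaryArray raiseAndFallEdgesQtd) := by unfold Pre_findTransmitionWindow; infer_instance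
def pvWitness_findTransmitionWindow : List Int × Int := ([0, 1, 1, 0], 2)

def Spec_findTransmitionWindow (binaryArray : List Int) (raiseAndFallEdgesQtd : Int) (out : Option Int × Option Int) : Prop := out = findTransmitionWindow_alt binaryArray raiseAndFallEdgesQtd
instance (binaryArray : List Int) (raiseAndFallEdgesQtd : Int) (out : Option Int × Option Int) : Decidable (Spec_findTransmitionWindow binaryArray raiseAndFallEdgesQtd out) := by unfold Spec_findTransmitionWindow; infer_instance

-- ===== CLAIM =====
def Claim_equal_findTransmitionWindow : Prop := ∀ (binaryArray : List Int) (raiseAndFallEdgesQtd : Int), Dom_findTransmitionWindow binaryArray raiseAndFallEdgesQtd → Pre_findTransmitionWindow binaryArray raiseAndFallEdgesQtd → Spec_findTransmitionWindow binaryArray raiseAndFallEdgesQtd (findTransmitionWindow binaryArray raiseAndFallEdgesQtd)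
-- ===== LEMMAS AND PROOFS =====

-- Characterisation of A's loop in terms of the filtered edge list.
theorem findTWLoopA_eq (a : List Int) (k : Int) :
    ∀ (is : List Nat) (ws we : Option Int) (t : Int), 0 ≤ t →
    findTWLoopA a k is ws we t =
      (let es := is.filter (fun i => decide (a.getD i 0 ≠ a.getD (i+1) 0))
       ((if t = 0 then ((es.head?.map Int.ofNat).orElse (fun _ => ws)) else ws),
        (if t < k ∧ k - t ≤ (es.length : Int)
         then some (((es.map Int.ofNat).getD (k - t - 1).toNat 0))
         else we))) := by
  intro is
  induction is with
  | nil =>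
      intro ws we t ht
      simp only [findTWLoopA, List.filter_nil, Prod.mk.injEq]
      refine ⟨?_, ?_⟩
      · rcases ht.lt_or_eq with h | h
        · simp [show t ≠ 0 by omega]
        · simp [← h, Option.orElse]
      · rw [if_neg (by simp)]
  | cons i rest ih =>
      intro ws we t ht
      by_cases hp : a.getD i 0 ≠ a.getD (i+1) 0
      · have hf : (i :: rest).filter (fun i => decide (a.getD i 0 ≠ a.getD (i+1) 0))
            = i :: rest.filter (fun i => decide (a.getD i 0 ≠ a.getD (i+1) 0)) := by
          rw [List.filter_cons, if_pos (by simpa using hp)]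
        simp only [findTWLoopA, if_pos hp, hf]
        by_cases hk : t + 1 = k
        · simp only [if_pos hk, Prod.mk.injEq]
          refine ⟨?_, ?_⟩
          · by_cases h0 : t = 0
            · simp [h0, Option.orElse]
            · simp [h0, show t + 1 ≠ 1 by omega]
          · rw [if_pos (by constructor <;> [omega; (push_cast [List.length_cons]; omega)])]
            have h0 : (k - t - 1).toNat = 0 := by omega
            simp [h0]
        · rw [if_neg hk, ih _ _ _ (by omega)]
          simp only [Prod.mk.injEq]
          refine ⟨?_, ?_⟩
          · by_cases h0 : t = 0
            · simp [h0, Option.orElse]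
            · simp [h0, show t + 1 ≠ 0 by omega, show t + 1 ≠ 1 by omega]
          · by_cases hc : t < k ∧ k - t ≤ ((rest.filter (fun i => decide (a.getD i 0 ≠ a.getD (i+1) 0))).length + 1 : Int)
            · have hc' : t + 1 < k ∧ k - (t + 1) ≤ ((rest.filter (fun i => decide (a.getD i 0 ≠ a.getD (i+1) 0))).length : Int) := by
                omega
              rw [if_pos hc', if_pos (by constructor <;> [omega; (push_cast [List.length_cons]; omega)])]
              have h1 : (k - t - 1).toNat = (k - (t+1) - 1).toNat + 1 := by omega
              simp [h1]
            · rw [if_neg (fun h => hc ⟨by omega, by have h2 := h.2; omega⟩),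
                  if_neg (fun h => hc ⟨h.1, by have h2 := h.2; simp only [List.length_cons] at h2; push_cast at h2 ⊢; omega⟩)]
      · have hf : (i :: rest).filter (fun i => decide (a.getD i 0 ≠ a.getD (i+1) 0))
            = rest.filter (fun i => decide (a.getD i 0 ≠ a.getD (i+1) 0)) := by
          rw [List.filter_cons, if_neg (by simpa using hp)]
        simp only [findTWLoopA, if_neg hp, hf]
        exact ih ws we t ht

theorem findTransmitionWindow_eq_alt (binaryArray : List Int) (raiseAndFallEdgesQtd : Int) :
    findTransmitionWindow binaryArray raiseAndFallEdgesQtd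
      = findTransmitionWindow_alt binaryArray raiseAndFallEdgesQtd := by
  unfold findTransmitionWindow findTransmitionWindow_alt
  rw [findTWLoopA_eq _ _ _ none none 0 le_rfl]
  set es := (List.range (binaryArray.length - 1)).filter
      (fun i => decide (binaryArray.getD i 0 ≠ binaryArray.getD (i+1) 0)) with hes
  simp only [sub_zero]
  have hcond : (0 < raiseAndFallEdgesQtd ∧ raiseAndFallEdgesQtd ≤ (es.length : Int))
      ↔ (1 ≤ raiseAndFallEdgesQtd ∧ raiseAndFallEdgesQtd ≤ ((es.map Int.ofNat).length : Int)) := by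
    simp; omega
  have hmap : (es.head?.map Int.ofNat).orElse (fun _ => none) = (es.map Int.ofNat).head? := by
    cases es <;> simp [Option.orElse]
  rw [hmap]
  by_cases hc : 0 < raiseAndFallEdgesQtd ∧ raiseAndFallEdgesQtd ≤ (es.length : Int)
  · rw [if_pos hc, if_pos (hcond.mp hc)]
    simp
  · rw [if_neg hc, if_neg (fun h => hc (hcond.mpr h))]
    simp

-- ===== VERDICT =====
theorem findTransmitionWindow_spec : Claim_equal_findTransmitionWindow := by
  intro a k _ _
  exact findTransmitionWindow_eq_alt a k
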